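-- pv_equiv track=rewrite | github.com/tekinpolat/tam_bolenler_6_dilde | tam_bolenleri.py | tam_bolenler
-- ===== SOURCE A (Python) =====
-- def tam_bolenler(sayi):
--     #index = (-1)*sayi
--     index = 1
--     sonuc = []
--     while index <= sayi:
--         if sayi % index == 0:
--             sonuc.extend([index, (-1)*index])
--         index += 1
--
--     return sonuc
-- ===== SOURCE B (Python) =====
-- def tam_bolenler(sayi):
--     small = []
--     large = []
--     i = 1
--     while i * i <= sayi:
--         if sayi % i == 0:
--             small.append(i)
--             q = sayi // i
--             if q != i:
--                 large.append(q)
--         i += 1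
--     out = []
--     for d in small + large[::-1]:
--         out.extend([d, -d])
--     return out
-- ===== Notes on version B (the rewrite author's own statement) =====
-- stated objective: faster
-- what changed: Replaces the full scan of 1..n testing every index with trial division up to sqrt(n) that collects each small divisor i together with its cofactor n//i, then emits the (d,-d) pairs over small ++ reversed(large).
import Mathlib
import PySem

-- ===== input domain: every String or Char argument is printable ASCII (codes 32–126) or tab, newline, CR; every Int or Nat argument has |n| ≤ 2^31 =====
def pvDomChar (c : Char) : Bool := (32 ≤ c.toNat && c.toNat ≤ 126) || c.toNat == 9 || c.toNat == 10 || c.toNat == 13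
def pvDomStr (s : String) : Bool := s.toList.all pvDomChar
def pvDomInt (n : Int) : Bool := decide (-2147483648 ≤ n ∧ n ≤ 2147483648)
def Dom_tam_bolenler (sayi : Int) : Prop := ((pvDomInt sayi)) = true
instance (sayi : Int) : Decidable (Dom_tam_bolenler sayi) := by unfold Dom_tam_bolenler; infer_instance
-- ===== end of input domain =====

-- B lists divisors by trial division up to √n (collecting each small divisor with its
-- cofactor) instead of A's full scan of 1..n; same output, asymptotically faster.

-- ===== PORT A =====
-- the while-loop of A, fuel-bounded: while index <= sayi: if sayi % index == 0: sonuc += [index, -index]; index += 1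
def tamLoopA (sayi : Int) (index : Int) (sonuc : List Int) : Nat → List Int
  | 0 => sonuc
  | fuel+1 =>
    if index ≤ sayi then
      tamLoopA sayi (index + 1)
        (if PySem.Int.mod sayi index = 0 then sonuc ++ [index, (-1) * index] else sonuc) fuel
    else sonuc

def tam_bolenler (sayi : Int) : List Int := tamLoopA sayi 1 [] sayi.toNat

-- ===== PORT B =====
-- B's while-loop: while i*i <= sayi: if sayi % i == 0: small.append(i); q = sayi//i; if q != i: large.append(q); i += 1
def tamLoopB (sayi : Int) (i : Int) (small large : List Int) : Nat → List Int × List Int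
  | 0 => (small, large)
  | fuel+1 =>
    if i * i ≤ sayi then
      if PySem.Int.mod sayi i = 0 then
        tamLoopB sayi (i + 1) (small ++ [i])
          (if PySem.Int.floordiv sayi i ≠ i then large ++ [PySem.Int.floordiv sayi i] else large) fuel
      else tamLoopB sayi (i + 1) small large fuel
    else (small, large)

def tam_bolenler_alt (sayi : Int) : List Int :=
  let p := tamLoopB sayi 1 [] [] sayi.toNat
  (p.1 ++ p.2.reverse).foldl (fun out d => out ++ [d, -d]) []

-- ===== PRECONDITION & SPEC =====
def Spec_tam_bolenler (sayi : Int) (out : List Int) : Prop := out = tam_bolenler_alt sayi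
instance (sayi : Int) (out : List Int) : Decidable (Spec_tam_bolenler sayi out) := by unfold Spec_tam_bolenler; infer_instance

-- ===== CLAIM (what is proved, stated in full; the proofs are below) =====
def Claim_equal_tam_bolenler : Prop := ∀ (sayi : Int), Dom_tam_bolenler sayi → Spec_tam_bolenler sayi (tam_bolenler sayi)

-- ===== LEMMAS AND PROOFS =====

-- all divisors of n in 1..n, ascending
def divisorsRange (n : Int) : List Int :=
  (PySem.List.pyRange 1 (n+1) 1).filter (fun d => decide (PySem.Int.mod n d = 0))

-- divisors d with i ≤ d and d*d ≤ n, ascending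
def pvSmall (n i : Int) : List Int :=
  (PySem.List.pyRange i (n+1) 1).filter (fun d => decide (d * d ≤ n) && decide (PySem.Int.mod n d = 0))

-- cofactors of a list of small divisors, skipping the square root
def pvLarge (n : Int) (l : List Int) : List Int :=
  l.filterMap (fun d => if PySem.Int.floordiv n d ≠ d then some (PySem.Int.floordiv n d) else none)

lemma mem_pvSmall {n i x : Int} :
    x ∈ pvSmall n i ↔ (i ≤ x ∧ x < n + 1) ∧ x * x ≤ n ∧ PySem.Int.mod n x = 0 := by
  simp [pvSmall, List.mem_filter, PySem.List.mem_pyRange_one]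

lemma pvSmall_eq_nil {n i : Int} (h1 : 1 ≤ i) (h : ¬ i * i ≤ n) : pvSmall n i = [] := by
  rw [List.eq_nil_iff_forall_not_mem]
  intro x hx
  rcases mem_pvSmall.mp hx with ⟨⟨hix, _⟩, hxx, _⟩
  nlinarith

lemma pvSmall_cons {n i : Int} (h1 : 1 ≤ i) (hii : i * i ≤ n) :
    pvSmall n i = (if PySem.Int.mod n i = 0 then [i] else []) ++ pvSmall n (i+1) := by
  have hin : i < n + 1 := by nlinarith
  unfold pvSmall
  rw [PySem.List.pyRange_one_cons hin]
  by_cases hm : PySem.Int.mod n i = 0 <;> simp [hm, hii]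

lemma loopA_eq (n : Int) : ∀ (fuel : Nat) (index : Int) (sonuc : List Int),
    (n + 1 - index).toNat ≤ fuel →
    tamLoopA n index sonuc fuel =
      sonuc ++ (PySem.List.pyRange index (n+1) 1).flatMap
        (fun d => if PySem.Int.mod n d = 0 then [d, (-1) * d] else []) := by
  intro fuel
  induction fuel with
  | zero =>
    intro index sonuc hf
    rw [PySem.List.pyRange_one_eq_nil (by omega)]
    simp [tamLoopA]
  | succ fuel ih =>
    intro index sonuc hf
    by_cases h : index ≤ n
    · rw [PySem.List.pyRange_one_cons (by omega)]
      simp only [tamLoopA, if_pos h]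
      rw [ih (index + 1) _ (by omega)]
      by_cases hm : PySem.Int.mod n index = 0 <;> simp [hm]
    · rw [PySem.List.pyRange_one_eq_nil (by omega)]
      simp [tamLoopA, h]

lemma loopB_eq (n : Int) : ∀ (fuel : Nat) (i : Int) (small large : List Int),
    1 ≤ i → (n + 1 - i).toNat ≤ fuel →
    tamLoopB n i small large fuel = (small ++ pvSmall n i, large ++ pvLarge n (pvSmall n i)) := by
  intro fuel
  induction fuel with
  | zero =>
    intro i small large h1 hf
    have hni : n < i := by omega
    have hnil : pvSmall n i = [] := pvSmall_eq_nil h1 (by nlinarith)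
    simp [tamLoopB, hnil, pvLarge]
  | succ fuel ih =>
    intro i small large h1 hf
    by_cases h : i * i ≤ n
    · have hin : i ≤ n := by nlinarith
      rw [pvSmall_cons h1 h]
      by_cases hm : PySem.Int.mod n i = 0
      · simp only [tamLoopB, if_pos h, if_pos hm]
        rw [ih (i+1) _ _ (by omega) (by omega)]
        simp [pvLarge, List.append_assoc]
        by_cases hq : PySem.Int.floordiv n i = i <;> simp [hq]
      · simp only [tamLoopB, if_pos h, if_neg hm]
        rw [ih (i+1) _ _ (by omega) (by omega)]
        simp
    · have hnil : pvSmall n i = [] := pvSmall_eq_nil h1 h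
      simp [tamLoopB, h, hnil, pvLarge]

-- the quotient times the divisor gives back n
lemma pvQuot_mul (n d : Int) (hd : 1 ≤ d) (hm : PySem.Int.mod n d = 0) :
    PySem.Int.floordiv n d * d = n := by
  rw [PySem.Int.floordiv_eq_ediv_of_pos (by omega)]
  exact Int.ediv_mul_cancel ((PySem.Int.mod_eq_zero_iff_dvd n d).mp hm)

lemma mem_divisorsRange {n x : Int} :
    x ∈ divisorsRange n ↔ (1 ≤ x ∧ x < n + 1) ∧ PySem.Int.mod n x = 0 := by
  simp [divisorsRange, PySem.List.mem_pyRange_one]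

lemma mem_pvLarge {n x : Int} {l : List Int} :
    x ∈ pvLarge n l ↔ ∃ d ∈ l, PySem.Int.floordiv n d ≠ d ∧ PySem.Int.floordiv n d = x := by
  simp [pvLarge, List.mem_filterMap]

-- two strictly increasing lists with the same members are equal
lemma pvList_eq_of_pairwise : ∀ (l1 l2 : List Int), l1.Pairwise (· < ·) → l2.Pairwise (· < ·) →
    (∀ x, x ∈ l1 ↔ x ∈ l2) → l1 = l2
  | [], l2, _, _, h => by
    have : ∀ x ∈ l2, False := fun x hx => by simpa using (h x).mpr hx
    cases l2 with
    | nil => rfl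
    | cons b t2 => exact absurd (this b (by simp)) id
  | a :: t1, l2, h1, h2, h => by
    cases l2 with
    | nil => exact absurd ((h a).mp (by simp)) (by simp)
    | cons b t2 =>
      have hab : a = b := by
        rcases List.mem_cons.mp ((h a).mp (by simp)) with h' | h'
        · exact h'
        · rcases List.mem_cons.mp ((h b).mpr (by simp)) with h'' | h''
          · exact h''.symm
          · have : b < a := List.rel_of_pairwise_cons h2 h'
            have : a < b := List.rel_of_pairwise_cons h1 h''
            omega
      subst hab
      have ht : t1 = t2 := by
        apply pvList_eq_of_pairwise t1 t2 h1.of_cons h2.of_cons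
        intro x
        constructor
        · intro hx
          have hax : a < x := List.rel_of_pairwise_cons h1 hx
          rcases List.mem_cons.mp ((h x).mp (List.mem_cons_of_mem a hx)) with h' | h'
          · omega
          · exact h'
        · intro hx
          have hax : a < x := List.rel_of_pairwise_cons h2 hx
          rcases List.mem_cons.mp ((h x).mpr (List.mem_cons_of_mem a hx)) with h' | h'
          · omega
          · exact h'
      rw [ht]

lemma pvSmall_pairwise (n : Int) : (pvSmall n 1).Pairwise (· < ·) :=
  (PySem.List.pairwise_lt_pyRange_one 1 (n+1)).filter _

lemma divisorsRange_pairwise (n : Int) : (divisorsRange n).Pairwise (· < ·) :=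
  (PySem.List.pairwise_lt_pyRange_one 1 (n+1)).filter _

lemma pvLarge_pairwise (n : Int) : (pvLarge n (pvSmall n 1)).Pairwise (fun a b => b < a) := by
  unfold pvLarge
  rw [List.pairwise_filterMap]
  have hp := (List.Pairwise.and_mem.mp (pvSmall_pairwise n))
  refine hp.imp ?_
  rintro a b ⟨ha, hb, hab⟩
  intro x hx y hy
  rcases mem_pvSmall.mp ha with ⟨⟨ha1, _⟩, haa, hma⟩
  rcases mem_pvSmall.mp hb with ⟨⟨hb1, _⟩, hbb, hmb⟩
  have hqa := pvQuot_mul n a ha1 hma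
  have hqb := pvQuot_mul n b hb1 hmb
  split at hx
  · split at hy
    · injection hx with hx
      injection hy with hy
      subst hx; subst hy
      by_contra hle
      push Not at hle
      have hn1 : 1 ≤ n := by nlinarith
      have hqb1 : 1 ≤ PySem.Int.floordiv n b := by nlinarith
      have h1 : PySem.Int.floordiv n a * a ≤ PySem.Int.floordiv n b * a :=
        mul_le_mul_of_nonneg_right hle (by linarith)
      have h2 : PySem.Int.floordiv n b * a < PySem.Int.floordiv n b * b :=
        mul_lt_mul_of_pos_left hab (by linarith)
      linarith
    · exact absurd hy (by simp)
  · exact absurd hx (by simp)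

lemma pvMain (n : Int) :
    pvSmall n 1 ++ (pvLarge n (pvSmall n 1)).reverse = divisorsRange n := by
  apply pvList_eq_of_pairwise
  · rw [List.pairwise_append]
    refine ⟨pvSmall_pairwise n, List.pairwise_reverse.mpr (pvLarge_pairwise n), ?_⟩
    intro x hx y hy
    rcases mem_pvSmall.mp hx with ⟨⟨hx1, _⟩, hxx, _⟩
    rcases mem_pvLarge.mp (List.mem_reverse.mp hy) with ⟨d, hd, hne, hq⟩
    rcases mem_pvSmall.mp hd with ⟨⟨hd1, _⟩, hdd, hmd⟩
    have hqd := pvQuot_mul n d hd1 hmd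
    rw [hq] at hqd hne
    -- d < y since d*d ≤ n = y*d and y ≠ d; then y*y > n ≥ x*x, so x < y
    have hdy : d < y := by rcases lt_or_eq_of_le (show d ≤ y by nlinarith) with h' | h'
                           · exact h'
                           · exact absurd h'.symm hne
    nlinarith
  · exact divisorsRange_pairwise n
  · intro x
    rw [List.mem_append, List.mem_reverse, mem_divisorsRange, mem_pvLarge]
    constructor
    · rintro (hx | ⟨d, hd, hne, hq⟩)
      · rcases mem_pvSmall.mp hx with ⟨⟨hx1, hxn⟩, hxx, hmx⟩
        exact ⟨⟨hx1, hxn⟩, hmx⟩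
      · rcases mem_pvSmall.mp hd with ⟨⟨hd1, _⟩, hdd, hmd⟩
        have hqd := pvQuot_mul n d hd1 hmd
        rw [hq] at hqd
        have hx1 : 1 ≤ x := by nlinarith
        refine ⟨⟨hx1, by nlinarith⟩, ?_⟩
        exact (PySem.Int.mod_eq_zero_iff_dvd n x).mpr ⟨d, by linarith⟩
    · rintro ⟨⟨hx1, hxn⟩, hmx⟩
      by_cases hxx : x * x ≤ n
      · exact Or.inl (mem_pvSmall.mpr ⟨⟨hx1, hxn⟩, hxx, hmx⟩)
      · right
        have hqx := pvQuot_mul n x hx1 hmx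
        set c := PySem.Int.floordiv n x with hc
        have hc1 : 1 ≤ c := by nlinarith
        have hcc : c * c ≤ n := by nlinarith
        have hmc : PySem.Int.mod n c = 0 :=
          (PySem.Int.mod_eq_zero_iff_dvd n c).mpr ⟨x, by linarith⟩
        have hqc := pvQuot_mul n c hc1 hmc
        have hqcx : PySem.Int.floordiv n c = x := by
          have : PySem.Int.floordiv n c * c = x * c := by nlinarith
          exact mul_right_cancel₀ (by omega) this
        refine ⟨c, mem_pvSmall.mpr ⟨⟨hc1, by nlinarith⟩, hcc, hmc⟩, ?_, hqcx⟩
        rw [hqcx]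
        intro h'
        rw [h'] at hqx
        nlinarith

lemma pvFlatMap_filter (p : Int → Prop) [DecidablePred p] (f : Int → List Int) :
    ∀ l : List Int, (l.filter (fun d => decide (p d))).flatMap f
      = l.flatMap (fun d => if p d then f d else [])
  | [] => rfl
  | a :: t => by
    by_cases h : p a <;>
      simp [h, pvFlatMap_filter p f t]

theorem tam_bolenler_spec : Claim_equal_tam_bolenler := by
  intro sayi _
  unfold Spec_tam_bolenler tam_bolenler tam_bolenler_alt
  rw [loopA_eq sayi sayi.toNat 1 [] (by omega),
      loopB_eq sayi sayi.toNat 1 [] [] (by omega) (by omega)]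
  rw [PySem.List.foldl_append_eq_flatMap]
  simp only [List.nil_append]
  rw [pvMain sayi]
  simp only [neg_one_mul]
  unfold divisorsRange
  rw [pvFlatMap_filter (fun d => PySem.Int.mod sayi d = 0) (fun d => [d, -d])]
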